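-- pv_equiv track=rewrite | github.com/minkyu-shim/leetcode-daily | easy/2206_divide_array_into_equal_pairs.py | divide_array_stack
-- ===== SOURCE A (Python) =====
-- def divide_array_stack(nums):
--     stack = []
--     for num in nums:
--         if num in stack:
--             stack.remove(num)
--         else:
--             stack.append(num)
--     return not stack
-- ===== SOURCE B (Python) =====
-- def divide_array_stack(nums):
--     counts = {}
--     for num in nums:
--         counts[num] = counts.get(num, 0) + 1
--     return all(c % 2 == 0 for c in counts.values())
-- ===== Notes on version B (the rewrite author's own statement) =====
-- stated objective: faster
-- what changed: Replaces the toggling stack with its O(n) membership tests and removals by a single counting pass into a dict followed by an all-values-even check.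
import Mathlib
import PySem

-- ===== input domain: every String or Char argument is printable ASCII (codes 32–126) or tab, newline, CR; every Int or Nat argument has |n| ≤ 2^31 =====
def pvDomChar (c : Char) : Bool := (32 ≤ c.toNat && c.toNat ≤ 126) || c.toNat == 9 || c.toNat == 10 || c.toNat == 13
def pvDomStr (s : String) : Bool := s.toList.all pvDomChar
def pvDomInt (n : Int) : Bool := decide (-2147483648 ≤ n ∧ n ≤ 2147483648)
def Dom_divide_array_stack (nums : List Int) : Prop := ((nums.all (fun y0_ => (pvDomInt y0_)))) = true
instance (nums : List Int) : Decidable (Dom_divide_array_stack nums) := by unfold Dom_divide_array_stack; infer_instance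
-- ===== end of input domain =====

-- B replaces A's toggling stack (with its linear inner membership scans) by one counting
-- pass into a dict plus an all-values-even check; equivalence is proved on all inputs.


-- ===== PORT A =====
-- stack = []; for num in nums: toggle num; return not stack
def divide_array_stack (nums : List Int) : Bool :=
  let stack := nums.foldl
    (fun st num => if st.contains num then st.erase num else st ++ [num]) []
  stack.isEmpty

-- ===== PORT B =====
-- counts = {}; for num in nums: counts[num] = counts.get(num, 0) + 1; all values even
def divide_array_stack_alt (nums : List Int) : Bool :=
  (nums.foldl (fun d num => d.insert num (d.getD num 0 + 1)) PySem.Dict.empty).values.all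
    (fun c => PySem.Int.mod c 2 == 0)

-- ===== PRECONDITION & SPEC =====
def Spec_divide_array_stack (nums : List Int) (out : Bool) : Prop := out = divide_array_stack_alt nums
instance (nums : List Int) (out : Bool) : Decidable (Spec_divide_array_stack nums out) := by unfold Spec_divide_array_stack; infer_instance

-- ===== CLAIM (what is proved, stated in full; the proofs are below) =====
def Claim_equal_divide_array_stack : Prop := ∀ (nums : List Int), Dom_divide_array_stack nums → Spec_divide_array_stack nums (divide_array_stack nums)

-- ===== LEMMAS AND PROOFS =====

-- A's loop invariant: starting from a duplicate-free stack, the count of x in the final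
-- stack is the parity of (count in the stack so far + count in the remaining input).
theorem pvStackCount (xs : List Int) :
    ∀ (st : List Int), (∀ y, st.count y ≤ 1) → ∀ x,
      (xs.foldl (fun st num => if st.contains num then st.erase num else st ++ [num]) st).count x
        = (st.count x + xs.count x) % 2 := by
  induction xs with
  | nil => intro st h x; have := h x; simp; omega
  | cons num xs ih =>
    intro st h x
    simp only [List.foldl_cons]
    by_cases hc : st.contains num
    · rw [if_pos hc]
      have h1 : st.count num = 1 :=
        le_antisymm (h num) (List.one_le_count_iff.mpr (by simpa using hc))
      have hinv : ∀ y, (st.erase num).count y ≤ 1 := fun y => by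
        rw [List.count_erase]; have := h y; omega
      rw [ih _ hinv x, List.count_erase, List.count_cons]
      by_cases hx : num = x
      · subst hx; rw [h1]; simp; omega
      · simp [hx]
    · rw [if_neg hc]
      have h0 : st.count num = 0 := List.count_eq_zero.mpr (by simpa using hc)
      have hinv : ∀ y, (st ++ [num]).count y ≤ 1 := fun y => by
        rw [List.count_append, List.count_singleton]
        have := h y
        by_cases hy : num = y
        · subst hy; simp [h0]
        · simp [hy]; omega
      rw [ih _ hinv x, List.count_append, List.count_singleton, List.count_cons]
      by_cases hx : num = x
      · subst hx; simp [h0]; omega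
      · simp [hx]

-- A returns true iff every element of nums occurs an even number of times.
theorem pvA_iff (nums : List Int) :
    divide_array_stack nums = true ↔ ∀ x, nums.count x % 2 = 0 := by
  unfold divide_array_stack
  simp only [List.isEmpty_iff]
  constructor
  · intro hnil x
    have := pvStackCount nums [] (by simp) x
    rw [hnil] at this
    simpa using this.symm
  · intro h
    rw [List.eq_nil_iff_forall_not_mem]
    intro x hx
    have hc := pvStackCount nums [] (by simp) x
    have hpos : 0 < (nums.foldl (fun st num => if st.contains num then st.erase num else st ++ [num]) []).count x :=
      List.count_pos_iff.mpr hx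
    have h2 := h x
    simp only [List.count_nil, Nat.zero_add] at hc
    omega

-- B returns true iff every element of nums occurs an even number of times.
theorem pvB_iff (nums : List Int) :
    divide_array_stack_alt nums = true ↔ ∀ x, nums.count x % 2 = 0 := by
  unfold divide_array_stack_alt
  rw [PySem.Dict.foldl_insert_getD_add_one_eq_counter,
      PySem.Dict.values_eq_map_keys _ (PySem.Dict.nodup_keys_counter nums) 0,
      PySem.Dict.keys_counter]
  simp only [List.all_map, List.all_eq_true, Function.comp,
    PySem.Dict.getD_counter, beq_iff_eq]
  constructor
  · intro h x
    by_cases hx : x ∈ nums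
    · have := h x (by simpa [PySem.Set.mem_ofList] using hx)
      rw [PySem.Int.mod_eq_emod_of_pos (by norm_num)] at this
      omega
    · simp [List.count_eq_zero_of_not_mem hx]
  · intro h k _
    have := h k
    rw [PySem.Int.mod_eq_emod_of_pos (by norm_num)]
    omega

-- ===== VERDICT (by name: the statement is the Claim_ definition above) =====
theorem divide_array_stack_spec : Claim_equal_divide_array_stack := by
  intro nums _
  unfold Spec_divide_array_stack
  by_cases h : ∀ x, nums.count x % 2 = 0
  · rw [(pvA_iff nums).mpr h, ((pvB_iff nums).mpr h).symm]
  · have ha : divide_array_stack nums = false := by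
      cases hA : divide_array_stack nums
      · rfl
      · exact absurd ((pvA_iff nums).mp hA) h
    have hb : divide_array_stack_alt nums = false := by
      cases hB : divide_array_stack_alt nums
      · rfl
      · exact absurd ((pvB_iff nums).mp hB) h
    rw [ha, hb]
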